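-- pv_equiv track=rewrite | github.com/YUECHE77/Signature-Frogery-Detection-with-Siamese | nets/Siamese.py | get_output_size
-- ===== SOURCE A (Python) =====
-- def get_output_size(width, height):
--     # Number of output channels is set -> 512
--     # The output width and height is determined by pooling
--     def compute_size(input_shape):
--         kernel_size = [2, 2, 2, 2, 2]
--         stride = [2, 2, 2, 2, 2]
--         padding = [0, 0, 0, 0, 0]
--
--         for i in range(len(kernel_size)):
--             # Just follow the formula of computing dimension
--             input_shape = (input_shape - kernel_size[i] + 2 * padding[i]) // stride[i] + 1
--
--         return input_shape
--
--     return compute_size(width) * compute_size(height)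
-- ===== SOURCE B (Python) =====
-- def get_output_size(width, height):
--     # Closed form: each pooling step maps x to (x - 2)//2 + 1 == x//2,
--     # and five halvings compose to //32.
--     return (width // 32) * (height // 32)
-- ===== Notes on version B (the rewrite author's own statement) =====
-- stated objective: simpler
-- what changed: Replaces the five-iteration pooling-size loop (with kernel/stride/padding arrays) by the closed form (width // 32) * (height // 32), using (x-2)//2+1 == x//2 and composition of floor halvings.
import Mathlib
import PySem

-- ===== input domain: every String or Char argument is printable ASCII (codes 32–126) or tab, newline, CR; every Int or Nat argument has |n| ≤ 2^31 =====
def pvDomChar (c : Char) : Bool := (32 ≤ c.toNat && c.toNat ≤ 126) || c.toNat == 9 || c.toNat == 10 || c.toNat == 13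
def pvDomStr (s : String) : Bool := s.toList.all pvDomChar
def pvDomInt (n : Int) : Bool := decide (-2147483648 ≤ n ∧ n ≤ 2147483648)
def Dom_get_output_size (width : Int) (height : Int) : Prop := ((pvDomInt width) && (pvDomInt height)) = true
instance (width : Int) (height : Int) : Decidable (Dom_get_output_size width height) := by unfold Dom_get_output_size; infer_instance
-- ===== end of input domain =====

-- B replaces A's five-step pooling loop by the closed form (w//32)*(h//32); simpler, same values.
-- ===== PORT A =====
-- nested helper compute_size from A, transliterated
def pvComputeSize (input_shape : Int) : Int :=
  let kernel_size : List Int := [2, 2, 2, 2, 2]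
  let stride : List Int := [2, 2, 2, 2, 2]
  let padding : List Int := [0, 0, 0, 0, 0]
  (PySem.List.pyRange 0 (Int.ofNat kernel_size.length) 1).foldl
    (fun s i =>
      PySem.Int.floordiv (s - PySem.List.pyGetD kernel_size i 0 + 2 * PySem.List.pyGetD padding i 0)
        (PySem.List.pyGetD stride i 0) + 1)
    input_shape

def get_output_size (width : Int) (height : Int) : Int :=
  pvComputeSize width * pvComputeSize height

-- ===== PORT B =====
def get_output_size_alt (width : Int) (height : Int) : Int :=
  PySem.Int.floordiv width 32 * PySem.Int.floordiv height 32

-- ===== PRECONDITION & SPEC =====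
def Spec_get_output_size (width : Int) (height : Int) (out : Int) : Prop := out = get_output_size_alt width height
instance (width : Int) (height : Int) (out : Int) : Decidable (Spec_get_output_size width height out) := by unfold Spec_get_output_size; infer_instance

-- ===== CLAIM (what is proved, stated in full; the proofs are below) =====
def Claim_equal_get_output_size : Prop := ∀ (width : Int) (height : Int), Dom_get_output_size width height → Spec_get_output_size width height (get_output_size width height)

-- ===== LEMMAS AND PROOFS =====

-- ===== VERDICT (by name: the statement is the Claim_ definition above) =====
theorem pvComputeSize_eq (x : Int) : pvComputeSize x = PySem.Int.floordiv x 32 := by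
  show List.foldl
      (fun s i =>
        PySem.Int.floordiv (s - PySem.List.pyGetD ([2,2,2,2,2] : List Int) i 0
            + 2 * PySem.List.pyGetD ([0,0,0,0,0] : List Int) i 0)
          (PySem.List.pyGetD ([2,2,2,2,2] : List Int) i 0) + 1)
      x (PySem.List.pyRange 0 (Int.ofNat ([2,2,2,2,2] : List Int).length) 1)
    = PySem.Int.floordiv x 32
  rw [show PySem.List.pyRange 0 (Int.ofNat ([2, 2, 2, 2, 2] : List Int).length) 1
        = [0, 1, 2, 3, 4] from by decide]
  simp only [List.foldl]
  norm_num [PySem.List.pyGetD, PySem.List.pyGet?, PySem.List.pyIdx?,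
    show Int.toNat 2 = 2 from rfl, show Int.toNat 3 = 3 from rfl, show Int.toNat 4 = 4 from rfl]
  omega

theorem get_output_size_spec : Claim_equal_get_output_size := by
  intro w h _
  unfold Spec_get_output_size get_output_size get_output_size_alt
  rw [pvComputeSize_eq, pvComputeSize_eq]
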